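-- pv_equiv track=rewrite | github.com/jorlyf/ege-informatics | 22 задание/4.py | f
-- ===== SOURCE A (Python) =====
-- def f(x):
--     a = 0
--     b = 1
--     while x > 0:
--         if x % 2 != 0:
--             a = a + x % 8
--         else:
--             b = b * (x % 8)
--
--         x = x // 8
--
--     return (a, b)
-- ===== SOURCE B (Python) =====
-- def f(x):
--     digits = []
--     while x > 0:
--         digits.append(x % 8)
--         x //= 8
--     a = sum(d for d in digits if d % 2 != 0)
--     b = 1
--     for d in digits:
--         if d % 2 == 0:
--             b = b * d
--     return (a, b)
-- ===== Notes on version B (the rewrite author's own statement) =====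
-- stated objective: simpler
-- what changed: A's single while loop interleaves both accumulators with a branch per step; B first materializes the list of octal digits with one divmod loop and then computes the odd-digit sum and even-digit product in two separate passes over that list.
import Mathlib
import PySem

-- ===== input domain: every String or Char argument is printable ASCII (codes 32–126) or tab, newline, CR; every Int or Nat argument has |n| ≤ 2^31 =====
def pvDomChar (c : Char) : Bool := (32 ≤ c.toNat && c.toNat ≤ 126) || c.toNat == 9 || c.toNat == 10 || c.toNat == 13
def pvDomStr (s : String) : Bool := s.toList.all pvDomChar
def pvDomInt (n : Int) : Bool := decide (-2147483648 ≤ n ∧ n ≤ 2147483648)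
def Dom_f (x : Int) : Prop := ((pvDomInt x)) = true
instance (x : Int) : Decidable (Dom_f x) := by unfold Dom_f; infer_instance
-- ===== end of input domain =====

-- B materializes the octal digits once, then computes the odd-digit sum and the
-- even-digit product in two separate passes (objective: simpler decomposition, not faster).

-- ===== PORT A =====
-- single interleaved while loop carrying both accumulators
def fGo (x a b : Int) : Int × Int :=
  if 0 < x then
    if PySem.Int.mod x 2 ≠ 0 then
      fGo (PySem.Int.floordiv x 8) (a + PySem.Int.mod x 8) b
    else
      fGo (PySem.Int.floordiv x 8) a (b * PySem.Int.mod x 8)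
  else (a, b)
termination_by x.toNat
decreasing_by
  all_goals
    (have h8 := PySem.Int.floordiv_eq_ediv_of_pos (a := x) (show (0:Int) < 8 by norm_num);
     rw [h8]; omega)

def f (x : Int) : Int × Int := fGo x 0 1

-- ===== PORT B =====
-- the octal digits of x, least significant first (the while loop of Source B)
def digitsOf (x : Int) : List Int :=
  if 0 < x then PySem.Int.mod x 8 :: digitsOf (PySem.Int.floordiv x 8) else []
termination_by x.toNat
decreasing_by
  (have h8 := PySem.Int.floordiv_eq_ediv_of_pos (a := x) (show (0:Int) < 8 by norm_num);
   rw [h8]; omega)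

def f_alt (x : Int) : Int × Int :=
  let digits := digitsOf x
  let a := ((digits.filter (fun d => PySem.Int.mod d 2 ≠ 0)).foldl (· + ·) 0)
  let b := digits.foldl (fun b d => if PySem.Int.mod d 2 = 0 then b * d else b) 1
  (a, b)

-- ===== PRECONDITION & SPEC =====
def Spec_f (x : Int) (out : Int × Int) : Prop := out = f_alt x
instance (x : Int) (out : Int × Int) : Decidable (Spec_f x out) := by unfold Spec_f; infer_instance

-- ===== CLAIM (what is proved, stated in full; the proofs are below) =====
def Claim_equal_f : Prop := ∀ (x : Int), Dom_f x → Spec_f x (f x)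

-- ===== LEMMAS AND PROOFS =====

theorem pv_mod8_mod2 (x : Int) :
    PySem.Int.mod (PySem.Int.mod x 8) 2 = PySem.Int.mod x 2 := by
  simp [PySem.Int.mod_eq_emod_of_pos]

theorem pv_foldl_add_hoist (l : List Int) (c : Int) :
    l.foldl (· + ·) c = c + l.foldl (· + ·) 0 := by
  induction l generalizing c with
  | nil => simp
  | cons d t ih => simp [List.foldl_cons, ih (c + d), ih d]; ring

theorem pv_foldl_mul_hoist (l : List Int) (c : Int) :
    l.foldl (fun b d => if PySem.Int.mod d 2 = 0 then b * d else b) c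
      = c * l.foldl (fun b d => if PySem.Int.mod d 2 = 0 then b * d else b) 1 := by
  induction l generalizing c with
  | nil => simp
  | cons d t ih =>
    simp only [List.foldl_cons]
    rw [ih (if PySem.Int.mod d 2 = 0 then c * d else c),
        ih (if PySem.Int.mod d 2 = 0 then 1 * d else 1)]
    split_ifs <;> ring

theorem pv_fGo_eq (x a b : Int) :
    fGo x a b =
      (a + ((digitsOf x).filter (fun d => PySem.Int.mod d 2 ≠ 0)).foldl (· + ·) 0,
       b * (digitsOf x).foldl (fun b d => if PySem.Int.mod d 2 = 0 then b * d else b) 1) := by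
  induction x, a, b using fGo.induct with
  | case1 x a b hpos hodd ih =>
    rw [fGo, if_pos hpos, if_pos hodd, ih]
    conv_rhs => rw [digitsOf]
    rw [if_pos hpos]
    have hd : PySem.Int.mod (PySem.Int.mod x 8) 2 ≠ 0 := by rw [pv_mod8_mod2]; exact hodd
    simp only [List.filter_cons, List.foldl_cons, hd, decide_not, decide_false,
      Bool.not_false, if_true]
    rw [pv_foldl_add_hoist ((digitsOf (PySem.Int.floordiv x 8)).filter
          (fun d => !decide (PySem.Int.mod d 2 = 0))) (0 + PySem.Int.mod x 8)]
    refine Prod.ext ?_ ?_ <;> simp <;> ring_nf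
  | case2 x a b hpos heven ih =>
    rw [fGo, if_pos hpos, if_neg heven, ih]
    conv_rhs => rw [digitsOf]
    rw [if_pos hpos]
    have heven' : PySem.Int.mod x 2 = 0 := by by_contra hc; exact heven hc
    have hd : PySem.Int.mod (PySem.Int.mod x 8) 2 = 0 := by rw [pv_mod8_mod2]; exact heven'
    simp only [List.filter_cons, List.foldl_cons, hd, decide_not, decide_true,
      Bool.not_true, if_true]
    rw [pv_foldl_mul_hoist (digitsOf (PySem.Int.floordiv x 8)) (1 * PySem.Int.mod x 8)]
    refine Prod.ext ?_ ?_ <;> simp <;> ring_nf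
  | case3 x a b hpos =>
    rw [fGo, if_neg hpos, digitsOf, if_neg hpos]
    simp

-- ===== VERDICT (by name: the statement is the Claim_ definition above) =====
theorem f_spec : Claim_equal_f := by
  intro x _
  unfold Spec_f f f_alt
  rw [pv_fGo_eq]
  simp
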